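-- pv_equiv track=rewrite | github.com/ryanpulley/DiscoverAEStoPylontech | BMS2Inverter.py | __BytesTo2bits
-- ===== SOURCE A (Python) =====
-- def __BytesTo2bits(data):
--    bits_array = []
--    doubleBitsArray = []
--    for byte in data:
--       bits = bin(byte)[2:].zfill(8)
--       bits_array.extend(map(int, bits))
--
--    for bittuple in zip(bits_array[::2], bits_array[1::2]):
--      #print (int(str(bit1) + str(bit2),2))
--      doubleBitsArray.append(int(str(bittuple[0]) + str(bittuple[1]),2))
--
--    return doubleBitsArray
-- ===== SOURCE B (Python) =====
-- def __BytesTo2bits(data):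
--     out = []
--     for byte in data:
--         out += [(byte >> 6) & 3, (byte >> 4) & 3, (byte >> 2) & 3, byte & 3]
--     return out
-- ===== Notes on version B (the rewrite author's own statement) =====
-- stated objective: idiomatic
-- what changed: B extracts the four 2-bit groups of each byte directly with shifts and masks in one pass, instead of A's building a flat bit list via bin()/zfill string formatting and then re-pairing it with strided slices, zip and a base-2 string parse.
-- outside the precondition, e.g. on __BytesTo2bits([256]): A returns [2, 0, 0, 0], B returns [0, 0, 0, 0]
import Mathlib
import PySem

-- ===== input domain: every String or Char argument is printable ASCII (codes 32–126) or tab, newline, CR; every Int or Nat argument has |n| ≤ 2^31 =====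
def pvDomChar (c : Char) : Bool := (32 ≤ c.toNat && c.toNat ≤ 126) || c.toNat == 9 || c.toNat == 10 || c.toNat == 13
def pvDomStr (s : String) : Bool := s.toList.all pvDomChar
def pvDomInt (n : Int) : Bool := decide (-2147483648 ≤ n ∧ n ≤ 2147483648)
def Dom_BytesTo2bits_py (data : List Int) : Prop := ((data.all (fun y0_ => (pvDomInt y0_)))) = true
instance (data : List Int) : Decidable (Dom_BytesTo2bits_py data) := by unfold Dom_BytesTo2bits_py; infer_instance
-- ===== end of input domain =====

-- B replaces A's bin()/zfill string formatting, strided-slice re-pairing and base-2 string parsing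
-- by direct shift-and-mask extraction of the four 2-bit groups of each byte (objective: idiomatic).

-- ===== PORT A =====
-- bits = bin(byte)[2:].zfill(8); bits_array.extend(map(int, bits))
-- int(c) for a single char c is int("c") = PySem.Int.ofChars? [c]; the .getD 0 is a totality
-- guard only (under Pre_ every char is '0' or '1', so ofChars? is always `some`).
def pvBitsOfByte (byte : Int) : List Int :=
  (PySem.Chars.zfill (PySem.Chars.slice (PySem.Int.toBinChars0b byte) (some 2) none) 8).map
    (fun c => (PySem.Int.ofChars? [c]).getD 0)

def BytesTo2bits_py (data : List Int) : List Int :=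
  -- first loop: bits_array built by extend
  let bits_array : List Int := data.foldl (fun acc byte => acc ++ pvBitsOfByte byte) []
  -- zip(bits_array[::2], bits_array[1::2]); step-2 slices never raise, .getD [] is a totality guard
  let pairs : List (Int × Int) :=
    ((PySem.List.slice? bits_array none none 2).getD []).zip
      ((PySem.List.slice? bits_array (some 1) none 2).getD [])
  -- second loop: append int(str(bit1) + str(bit2), 2)
  pairs.foldl (fun acc t =>
    acc ++ [(PySem.Int.ofCharsBase? (PySem.Int.toChars t.1 ++ PySem.Int.toChars t.2) 2).getD 0]) []

-- ===== PORT B =====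
def BytesTo2bits_py_alt (data : List Int) : List Int :=
  data.foldl (fun (out : List Int) (byte : Int) =>
    out ++ [PySem.Int.band (byte >>> (6 : Nat)) 3, PySem.Int.band (byte >>> (4 : Nat)) 3,
            PySem.Int.band (byte >>> (2 : Nat)) 3, PySem.Int.band byte 3]) []

-- ===== PRECONDITION & SPEC =====
-- Pre_ restricts to the natural byte domain 0..255: on a negative entry A raises ValueError
-- (bin() yields '-0b…' and int('b…') fails), and for entries ≥ 256 A's bin() emits a
-- variable-width bit string, an artefact of the string formatting (see the cited example).
def Pre_BytesTo2bits_py (data : List Int) : Prop := ∀ b ∈ data, 0 ≤ b ∧ b < 256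
instance (data : List Int) : Decidable (Pre_BytesTo2bits_py data) := by
  unfold Pre_BytesTo2bits_py; infer_instance
def pvWitness_BytesTo2bits_py : List Int := [0, 77, 255]

def Spec_BytesTo2bits_py (data : List Int) (out : List Int) : Prop := out = BytesTo2bits_py_alt data
instance (data : List Int) (out : List Int) : Decidable (Spec_BytesTo2bits_py data out) := by
  unfold Spec_BytesTo2bits_py; infer_instance

-- ===== CLAIM (what is proved, stated in full; the proofs are below) =====
def Claim_equal_BytesTo2bits_py : Prop := ∀ (data : List Int), Dom_BytesTo2bits_py data → Pre_BytesTo2bits_py data → Spec_BytesTo2bits_py data (BytesTo2bits_py data)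

-- ===== LEMMAS AND PROOFS =====

-- the elements of xs at even indices (what xs[::2] yields)
def pvEvens : List Int → List Int
  | [] => []
  | [a] => [a]
  | a :: _ :: t => a :: pvEvens t

-- consecutive disjoint pairs of xs (what zip(xs[::2], xs[1::2]) yields)
def pvPairs : List Int → List (Int × Int)
  | a :: b :: t => (a, b) :: pvPairs t
  | _ => []

theorem pvEvens_core (xs : List Int) :
    List.filterMap (fun k => xs[2 * k]?) (List.range ((xs.length + 1) / 2)) = pvEvens xs := by
  induction xs using pvEvens.induct with
  | case1 => rfl
  | case2 a => simp [pvEvens]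
  | case3 a b t ih =>
    have hlen : ((a :: b :: t).length + 1) / 2 = (t.length + 1) / 2 + 1 := by
      simp [List.length_cons]; omega
    rw [hlen, List.range_succ_eq_map, List.filterMap_cons, List.filterMap_map]
    have hf : (fun k => (a :: b :: t)[2 * k]?) ∘ Nat.succ = fun k => t[2 * k]? := by
      funext k
      have h2 : 2 * Nat.succ k = (2 * k) + 1 + 1 := by omega
      simp [h2]
    rw [hf, ih]
    rfl

theorem pvSlice_even (xs : List Int) :
    PySem.List.slice? xs none none 2 = some (pvEvens xs) := by
  simp only [PySem.List.slice?, PySem.List.sliceIndices]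
  norm_num
  have hcnt : (if 0 < xs.length then (((xs.length : Int) + 2 - 1) / 2).toNat else 0)
      = (xs.length + 1) / 2 := by split <;> omega
  have hf : (fun x : Nat => xs[(2 * (x : Int)).toNat]?) = fun k => xs[2 * k]? := by
    funext k
    have h : (2 * (k : Int)).toNat = 2 * k := by omega
    rw [h]
  rw [hcnt, hf, pvEvens_core]

theorem pvSlice_odd (xs : List Int) :
    PySem.List.slice? xs (some 1) none 2 = some (pvEvens xs.tail) := by
  simp only [PySem.List.slice?, PySem.List.sliceIndices]
  norm_num
  cases xs with
  | nil => simp [pvEvens]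
  | cons a t =>
    have hmin : min 1 ((a :: t).length : Int) = 1 := by
      simp only [List.length_cons]; omega
    rw [hmin]
    have hcnt : (if 1 < (a :: t).length then
        ((((a :: t).length : Int) - 1 + 2 - 1) / 2).toNat else 0)
        = (t.length + 1) / 2 := by
      simp only [List.length_cons]
      split <;> omega
    have hf : (fun x : Nat => (a :: t)[((1 : Int) + 2 * (x : Int)).toNat]?)
        = fun k => t[2 * k]? := by
      funext k
      have h : ((1 : Int) + 2 * (k : Int)).toNat = 2 * k + 1 := by omega
      rw [h]
      simp
    rw [hcnt, hf, pvEvens_core]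
    rfl

theorem pvEvens_cons_tail (b : Int) (t : List Int) :
    pvEvens (b :: t) = b :: pvEvens t.tail := by
  cases t <;> rfl

theorem pvZip_evens (xs : List Int) :
    (pvEvens xs).zip (pvEvens xs.tail) = pvPairs xs := by
  induction xs using pvEvens.induct with
  | case1 => rfl
  | case2 a => rfl
  | case3 a b t ih =>
    simp only [pvEvens, List.tail_cons, pvEvens_cons_tail, List.zip_cons_cons, pvPairs]
    exact congrArg _ ih

theorem pvPairs_append (l r : List Int) (h : l.length % 2 = 0) :
    pvPairs (l ++ r) = pvPairs l ++ pvPairs r := by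
  induction l using pvPairs.induct with
  | case1 a b t ih =>
    simp only [List.cons_append, pvPairs, List.length_cons] at *
    exact congrArg _ (ih (by omega))
  | case2 l hne =>
    match l, hne with
    | [], _ => rfl
    | [a], h2 => simp at h
    | a :: b :: t, h2 => exact absurd rfl (h2 a b t)

-- int(str(b1) + str(b2), 2) for the pair, as A computes it
def pvPairVal (t : Int × Int) : Int :=
  (PySem.Int.ofCharsBase? (PySem.Int.toChars t.1 ++ PySem.Int.toChars t.2) 2).getD 0

-- the four 2-bit groups, as B computes them
def pvQuad (b : Int) : List Int :=
  [PySem.Int.band (b >>> (6 : Nat)) 3, PySem.Int.band (b >>> (4 : Nat)) 3,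
   PySem.Int.band (b >>> (2 : Nat)) 3, PySem.Int.band b 3]

-- per-byte agreement, checked over all 256 byte values
set_option maxRecDepth 8192 in
theorem pvByteAll : ∀ i : Fin 256,
    (pvBitsOfByte ((i : Nat) : Int)).length = 8 ∧
    (pvPairs (pvBitsOfByte ((i : Nat) : Int))).map pvPairVal = pvQuad ((i : Nat) : Int) := by
  decide

theorem pvByte (b : Int) (h0 : 0 ≤ b) (h1 : b < 256) :
    (pvBitsOfByte b).length = 8 ∧
    (pvPairs (pvBitsOfByte b)).map pvPairVal = pvQuad b := by
  have hb : b = ((b.toNat : Nat) : Int) := by omega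
  have hlt : b.toNat < 256 := by omega
  rw [hb]
  exact pvByteAll ⟨b.toNat, hlt⟩

theorem pvA_eq (data : List Int) :
    BytesTo2bits_py data = (pvPairs (data.flatMap pvBitsOfByte)).map pvPairVal := by
  unfold BytesTo2bits_py
  simp only [PySem.List.foldl_append_eq_flatMap, List.nil_append]
  rw [pvSlice_even, pvSlice_odd]
  simp only [Option.getD_some, pvZip_evens, ← List.map_eq_flatMap]
  rfl

theorem pvB_eq (data : List Int) :
    BytesTo2bits_py_alt data = data.flatMap pvQuad := by
  unfold BytesTo2bits_py_alt
  rw [PySem.List.foldl_append_eq_flatMap]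
  rfl

theorem pvMain (data : List Int) (hpre : Pre_BytesTo2bits_py data) :
    (pvPairs (data.flatMap pvBitsOfByte)).map pvPairVal = data.flatMap pvQuad := by
  induction data with
  | nil => rfl
  | cons b d ih =>
    have hb := hpre b (by simp)
    obtain ⟨hlen, hquad⟩ := pvByte b hb.1 hb.2
    rw [List.flatMap_cons, List.flatMap_cons,
      pvPairs_append _ _ (by rw [hlen]), List.map_append, hquad]
    exact congrArg _ (ih (fun x hx => hpre x (by simp [hx])))

-- ===== VERDICT (by name: the statement is the Claim_ definition above) =====
theorem BytesTo2bits_py_spec : Claim_equal_BytesTo2bits_py := by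
  intro data _ hpre
  unfold Spec_BytesTo2bits_py
  rw [pvA_eq, pvB_eq, pvMain data hpre]
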